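-- pv_equiv track=rewrite | github.com/suggondeese9/wordsmapping | processwords.py | generate_bitmasks2
-- ===== SOURCE A (Python) =====
-- from itertools import permutations, product, chain
--
-- def generate_bitmasks2(dictionary):
--     # Create a list of lists where each sublist contains the bit positions for each key
--     bit_positions = []
--     current_bit = 0
--     for key in dictionary:
--         bit_positions.append([(current_bit + i, dictionary[key][i]) for i in range(len(dictionary[key]))])
--         current_bit += len(dictionary[key])
--
--     # Generate all combinations of bit positions including the possibility of no bit set for each key
--     for combination in product(*[chain([(None, None)], positions) for positions in bit_positions]):
--         bitmask = [0] * current_bit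
--         selected_values = []
--         for pos, value in combination:
--             if pos is not None:
--                 bitmask[pos] = 1
--                 selected_values.append(value)
--         yield ''.join(map(str, bitmask)), ''.join(selected_values)
-- ===== SOURCE B (Python) =====
-- def generate_bitmasks2(dictionary):
--     # Recursive DFS over the keys: at each key, first the "no bit" choice, then one
--     # branch per value; the bitmask is rendered at the leaves by range membership.
--     items = list(dictionary.items())
--     total = sum(len(vs) for vs in dictionary.values())
--
--     def dfs(i, offset, chosen, values):
--         if i == len(items):
--             yield (''.join('1' if b in chosen else '0' for b in range(total)),
--                    ''.join(values))
--             return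
--         vs = items[i][1]
--         yield from dfs(i + 1, offset + len(vs), chosen, values)
--         for j in range(len(vs)):
--             yield from dfs(i + 1, offset + len(vs), chosen | {offset + j},
--                            values + [vs[j]])
--
--     yield from dfs(0, 0, frozenset(), [])
-- ===== Notes on version B (the rewrite author's own statement) =====
-- stated objective: alternative
-- what changed: Replaces A's itertools product-of-chained-iterators pipeline (build all bit_positions, take the cartesian product, then re-scan each combination to set bits in a mutable [0]*n list) by a direct recursive DFS over the keys that carries the chosen bit-index set and selected values and renders the bitmask at each leaf by membership over range(total).
import Mathlib
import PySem

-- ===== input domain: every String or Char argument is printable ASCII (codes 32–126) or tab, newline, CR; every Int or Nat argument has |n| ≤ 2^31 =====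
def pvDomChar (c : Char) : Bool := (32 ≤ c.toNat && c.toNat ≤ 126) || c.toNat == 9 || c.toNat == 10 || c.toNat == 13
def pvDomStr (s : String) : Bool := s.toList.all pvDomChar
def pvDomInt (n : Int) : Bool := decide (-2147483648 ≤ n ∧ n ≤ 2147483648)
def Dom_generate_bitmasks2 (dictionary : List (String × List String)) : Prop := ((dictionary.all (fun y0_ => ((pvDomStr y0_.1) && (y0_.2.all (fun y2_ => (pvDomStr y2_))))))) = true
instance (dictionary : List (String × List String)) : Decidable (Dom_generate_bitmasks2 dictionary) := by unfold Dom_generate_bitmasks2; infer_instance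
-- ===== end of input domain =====

-- B replaces A's product-of-iterators pipeline by a direct recursive DFS over the keys
-- (objective: alternative decomposition, same cost); both versions return the yielded pairs as a list.

-- ===== PORT A =====

-- itertools.product over a list of factor lists, in Python's order (first factor slowest)
def pvProduct {α : Type} (fs : List (List α)) : List (List α) :=
  fs.foldr (fun f acc => f.flatMap (fun x => acc.map (fun c => x :: c))) [[]]

-- Python's (None, None) placeholder is (none, ""); its second component is never read
-- (selected_values only collects pairs whose position is not None).
def generate_bitmasks2 (dictionary : List (String × List String)) : List (String × String) :=
  let st := dictionary.foldl
    (fun (st : List (List (Option Nat × String)) × Nat) kv =>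
      let vs := (PySem.Dict.mk dictionary).getD kv.1 []
      (st.1 ++ [(List.range vs.length).map (fun i => ((some (st.2 + i), vs[i]!) : Option Nat × String))],
       st.2 + vs.length))
    ([], 0)
  let bit_positions := st.1
  let current_bit := st.2
  (pvProduct (bit_positions.map (fun positions => ((none, "") : Option Nat × String) :: positions))).map
    (fun combination =>
      let res := combination.foldl
        (fun (bv : List Int × List String) pv =>
          match pv.1 with
          | some pos => (bv.1.set pos 1, bv.2 ++ [pv.2])
          | none => bv)
        (List.replicate current_bit 0, [])
      (PySem.Str.join "" (res.1.map PySem.Int.toStr), PySem.Str.join "" res.2))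

-- ===== PORT B =====

def pvDfs (total : Nat) : List (String × List String) → Nat → PySem.Set Nat → List String → List (String × String)
  | [], _, chosen, values =>
      [(PySem.Str.join "" ((List.range total).map (fun b => if PySem.Set.contains chosen b then "1" else "0")),
        PySem.Str.join "" values)]
  | (_, vs) :: rest, offset, chosen, values =>
      pvDfs total rest (offset + vs.length) chosen values ++
      (List.range vs.length).flatMap (fun j =>
        pvDfs total rest (offset + vs.length) (chosen.add (offset + j)) (values ++ [vs[j]!]))

def generate_bitmasks2_alt (dictionary : List (String × List String)) : List (String × String) :=
  let total := (dictionary.map (fun kv => kv.2.length)).sum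
  pvDfs total dictionary 0 (PySem.Set.ofList []) []

-- ===== PRECONDITION & SPEC =====
-- Pre_ excludes association lists with duplicate keys: such lists do not represent any Python
-- dict (dict construction collapses duplicates), so A's list-level behaviour there is unspecified.
def Pre_generate_bitmasks2 (dictionary : List (String × List String)) : Prop :=
  (dictionary.map Prod.fst).Nodup
instance (dictionary : List (String × List String)) : Decidable (Pre_generate_bitmasks2 dictionary) := by
  unfold Pre_generate_bitmasks2; infer_instance

def pvWitness_generate_bitmasks2 : (List (String × List String)) :=
  [("a", ["x", "y"]), ("b", ["z"])]

def Spec_generate_bitmasks2 (dictionary : List (String × List String)) (out : List (String × String)) : Prop := out = generate_bitmasks2_alt dictionary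
instance (dictionary : List (String × List String)) (out : List (String × String)) : Decidable (Spec_generate_bitmasks2 dictionary out) := by unfold Spec_generate_bitmasks2; infer_instance

-- ===== CLAIM (what is proved, stated in full; the proofs are below) =====
def Claim_equal_generate_bitmasks2 : Prop := ∀ (dictionary : List (String × List String)), Dom_generate_bitmasks2 dictionary → Pre_generate_bitmasks2 dictionary → Spec_generate_bitmasks2 dictionary (generate_bitmasks2 dictionary)

-- ===== LEMMAS AND PROOFS =====

-- bit_positions of A, as a structural recursion (valid once lookups return each key's own values)
def pvBP : List (String × List String) → Nat → List (List (Option Nat × String))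
  | [], _ => []
  | (_, vs) :: rest, cur =>
      (List.range vs.length).map (fun i => ((some (cur + i), vs[i]!) : Option Nat × String)) ::
      pvBP rest (cur + vs.length)

-- the (position, value) pairs a combination actually selects
def pvPicks (comb : List (Option Nat × String)) : List (Nat × String) :=
  comb.filterMap (fun pv => pv.1.map (fun p => (p, pv.2)))

-- the pair yielded for a given list of chosen bit positions and selected values
def pvRender (total : Nat) (ps : List Nat) (vals : List String) : String × String :=
  (PySem.Str.join "" ((List.range total).map (fun b => if ps.contains b then "1" else "0")),
   PySem.Str.join "" vals)

lemma pvRender_congr (total : Nat) (ps qs : List Nat) (vals : List String)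
    (h : ∀ b, b ∈ ps ↔ b ∈ qs) : pvRender total ps vals = pvRender total qs vals := by
  unfold pvRender
  congr 2
  exact List.map_congr_left (fun b _ => by simp [h b])

-- A's first loop: with every lookup returning the pair's own values, it appends pvBP
-- and adds up the value-list lengths.
lemma pvFoldA_eq (D : List (String × List String))
    (hD : ∀ k vs, (k, vs) ∈ D → (PySem.Dict.mk D).getD k [] = vs) :
    ∀ (d : List (String × List String)) (_ : ∀ p ∈ d, p ∈ D)
      (acc : List (List (Option Nat × String))) (cur : Nat),
      d.foldl
        (fun (st : List (List (Option Nat × String)) × Nat) kv =>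
          let vs := (PySem.Dict.mk D).getD kv.1 []
          (st.1 ++ [(List.range vs.length).map (fun i => ((some (st.2 + i), vs[i]!) : Option Nat × String))],
           st.2 + vs.length))
        (acc, cur)
      = (acc ++ pvBP d cur, cur + (d.map (fun kv => kv.2.length)).sum) := by
  intro d
  induction d with
  | nil => intro _ acc cur; simp [pvBP]
  | cons kv rest ih =>
    intro hmem acc cur
    obtain ⟨k, vs⟩ := kv
    have hk : (PySem.Dict.mk D).getD k [] = vs := hD k vs (hmem _ (List.mem_cons_self))
    rw [List.foldl_cons]
    simp only [hk]
    rw [ih (fun p hp => hmem p (List.mem_cons_of_mem _ hp))]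
    simp [pvBP]
    omega

-- A's inner loop over a combination, split into its two accumulators
lemma pvFoldComb (comb : List (Option Nat × String)) :
    ∀ (bm : List Int) (vals : List String),
      comb.foldl
        (fun (bv : List Int × List String) pv =>
          match pv.1 with
          | some pos => (bv.1.set pos 1, bv.2 ++ [pv.2])
          | none => bv)
        (bm, vals)
      = ((pvPicks comb).foldl (fun b pv => b.set pv.1 1) bm,
         vals ++ (pvPicks comb).map Prod.snd) := by
  induction comb with
  | nil => intro bm vals; simp [pvPicks]
  | cons pv comb ih =>
    intro bm vals
    obtain ⟨p, v⟩ := pv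
    cases p with
    | none => simpa [pvPicks] using ih bm vals
    | some pos => simpa [pvPicks] using ih (bm.set pos 1) (vals ++ [v])

lemma pvSetFold_length (ps : List Nat) : ∀ (bm : List Int),
    (ps.foldl (fun l p => l.set p (1 : Int)) bm).length = bm.length := by
  induction ps with
  | nil => intro bm; rfl
  | cons p ps ih => intro bm; simpa using ih (bm.set p 1)

lemma pvSetFold_getElem? (ps : List Nat) : ∀ (bm : List Int) (b : Nat), b < bm.length →
    (ps.foldl (fun l p => l.set p (1 : Int)) bm)[b]? = if b ∈ ps then some 1 else bm[b]? := by
  induction ps with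
  | nil => intro bm b h; simp
  | cons p ps ih =>
    intro bm b h
    have h' : b < (bm.set p 1).length := by simpa using h
    rw [List.foldl_cons, ih (bm.set p 1) b h', List.getElem?_set]
    by_cases hb : b ∈ ps <;> by_cases hp : p = b <;> simp [hb, hp] <;> omega

-- setting bits one by one then printing = printing by membership over range(total)
lemma pvMask_eq (total : Nat) (ps : List Nat) :
    (ps.foldl (fun l p => l.set p (1 : Int)) (List.replicate total 0)).map PySem.Int.toStr
    = (List.range total).map (fun b => if ps.contains b then "1" else "0") := by
  apply List.ext_getElem?
  intro b
  rw [List.getElem?_map, List.getElem?_map]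
  by_cases hb : b < total
  · rw [pvSetFold_getElem? ps _ b (by simpa using hb), List.getElem?_range hb,
      List.getElem?_replicate]
    by_cases hm : b ∈ ps <;> simp [hm, hb] <;> decide
  · have h1 : (ps.foldl (fun l p => l.set p (1 : Int)) (List.replicate total 0))[b]? = none := by
      rw [List.getElem?_eq_none_iff, pvSetFold_length]; simpa using Nat.le_of_not_lt hb
    have h2 : (List.range total)[b]? = none := by
      rw [List.getElem?_eq_none_iff]; simpa using Nat.le_of_not_lt hb
    rw [h1, h2]; rfl

-- B's DFS produces exactly A's product order, rendered by membership
lemma pvDfs_eq (total : Nat) :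
    ∀ (d : List (String × List String)) (cur : Nat) (chosen : PySem.Set Nat) (values : List String),
      pvDfs total d cur chosen values
      = (pvProduct ((pvBP d cur).map (fun ps => ((none, "") : Option Nat × String) :: ps))).map
          (fun comb => pvRender total (chosen ++ (pvPicks comb).map Prod.fst)
                                      (values ++ (pvPicks comb).map Prod.snd)) := by
  intro d
  induction d with
  | nil =>
    intro cur chosen values
    simp [pvDfs, pvBP, pvProduct, pvPicks, pvRender]
  | cons kv rest ih =>
    intro cur chosen values
    obtain ⟨k, vs⟩ := kv
    rw [pvDfs]
    have hprod : pvProduct ((pvBP ((k, vs) :: rest) cur).map (fun ps => ((none, "") : Option Nat × String) :: ps))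
        = (((none, "") : Option Nat × String) :: (List.range vs.length).map (fun i => ((some (cur + i), vs[i]!) : Option Nat × String))).flatMap
            (fun x => (pvProduct ((pvBP rest (cur + vs.length)).map (fun ps => ((none, "") : Option Nat × String) :: ps))).map (x :: ·)) := by
      rw [pvBP]; rfl
    rw [hprod]
    rw [List.flatMap_cons, List.map_append]
    congr 1
    · -- the (None, None) choice selects nothing
      rw [ih (cur + vs.length) chosen values, List.map_map]
      refine List.map_congr_left (fun comb _ => ?_)
      simp [pvPicks]
    · -- one branch per value of this key
      rw [List.map_flatMap, List.flatMap_map]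
      refine List.flatMap_congr (fun j hj => ?_)
      rw [ih (cur + vs.length) (chosen.add (cur + j)) (values ++ [vs[j]!]), List.map_map]
      refine List.map_congr_left (fun comb _ => ?_)
      have hpicks : pvPicks (((some (cur + j), vs[j]!) : Option Nat × String) :: comb)
          = (cur + j, vs[j]!) :: pvPicks comb := by simp [pvPicks]
      rw [Function.comp_apply, hpicks]
      simp only [List.map_cons]
      rw [List.append_assoc]
      simp only [List.singleton_append]
      exact pvRender_congr total _ _ _ (fun b => by
        constructor
        · intro hb
          rcases List.mem_append.1 hb with h1 | h2
          · rcases (PySem.Set.mem_add chosen (cur + j) b).1 h1 with h | h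
            · exact List.mem_append.2 (Or.inl h)
            · exact List.mem_append.2 (Or.inr (by simp [h]))
          · exact List.mem_append.2 (Or.inr (List.mem_cons_of_mem _ h2))
        · intro hb
          rcases List.mem_append.1 hb with h1 | h2
          · exact List.mem_append.2 (Or.inl ((PySem.Set.mem_add chosen (cur + j) b).2 (Or.inl h1)))
          · rcases List.mem_cons.1 h2 with h | h
            · exact List.mem_append.2 (Or.inl ((PySem.Set.mem_add chosen (cur + j) b).2 (Or.inr h)))
            · exact List.mem_append.2 (Or.inr h))

-- ===== VERDICT (by name: the statement is the Claim_ definition above) =====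
theorem generate_bitmasks2_spec : Claim_equal_generate_bitmasks2 := by
  intro d _ hPre
  unfold Spec_generate_bitmasks2
  have hnodup : (PySem.Dict.mk d).keys.Nodup := hPre
  have hD : ∀ k vs, (k, vs) ∈ d → (PySem.Dict.mk d).getD k [] = vs := fun k vs hkv =>
    PySem.Dict.getD_of_mem_items (PySem.Dict.mk d) hkv hnodup []
  unfold generate_bitmasks2 generate_bitmasks2_alt
  rw [pvFoldA_eq d hD d (fun _ hp => hp) [] 0]
  rw [show (PySem.Set.ofList ([] : List Nat)) = [] from rfl,
    pvDfs_eq ((d.map (fun kv => kv.2.length)).sum) d 0 [] []]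
  simp only [List.nil_append, Nat.zero_add]
  refine List.map_congr_left (fun comb _ => ?_)
  rw [pvFoldComb comb (List.replicate ((d.map (fun kv => kv.2.length)).sum) 0) []]
  simp only [List.nil_append]
  have hfm : (pvPicks comb).foldl (fun b pv => b.set pv.1 1)
      (List.replicate ((d.map (fun kv => kv.2.length)).sum) (0 : Int))
      = ((pvPicks comb).map Prod.fst).foldl (fun l p => l.set p (1 : Int))
          (List.replicate ((d.map (fun kv => kv.2.length)).sum) (0 : Int)) :=
    (List.foldl_map (f := Prod.fst) (g := fun l p => l.set p (1 : Int))
      (l := pvPicks comb)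
      (init := List.replicate ((d.map (fun kv => kv.2.length)).sum) (0 : Int))).symm
  rw [hfm, pvMask_eq]
  rfl
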